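-- pv_equiv track=rewrite | github.com/peterhan91/multiplex-preproc | scripts/readers.py | resolve_reference_channel_index
-- ===== SOURCE A (Python) =====
-- def resolve_reference_channel_index(channel_names: list[str], match_any: list[str], fallback_index: int = 0) -> int:
--     """Find the channel whose name matches the highest-priority needle.
--
--     Iterates `match_any` in order and returns the first channel matching the
--     first matching needle (substring + case-insensitive). This lets configs
--     prefer e.g. ``DNA1`` over ``HistoneH3`` even when both are valid nuclear
--     references in the same panel. Falls back to `fallback_index` when nothing
--     matches (default 0 = first channel).
--     """
--     if not channel_names:
--         return fallback_index
--     for needle in (match_any or []):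
--         n = needle.lower()
--         for i, name in enumerate(channel_names):
--             if name and n in name.lower():
--                 return i
--     return fallback_index
-- ===== SOURCE B (Python) =====
-- def resolve_reference_channel_index(channel_names: list[str], match_any: list[str], fallback_index: int = 0) -> int:
--     """Single scan over channels: score each channel by the index of the first
--     needle it matches, keeping the argmin (score, earliest channel).  Only
--     needles that would strictly beat the current best are tried, and a perfect
--     score of 0 stops the scan."""
--     if not channel_names or not match_any:
--         return fallback_index
--     needles = [m.lower() for m in match_any]
--     best_i = None
--     best_score = None
--     for i, name in enumerate(channel_names):
--         if not name:
--             continue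
--         low = name.lower()
--         limit = len(needles) if best_score is None else best_score
--         score = next((j for j, n in enumerate(needles[:limit]) if n in low), None)
--         if score is not None:
--             best_score, best_i = score, i
--             if score == 0:
--                 break
--     return fallback_index if best_i is None else best_i
-- ===== Notes on version B (the rewrite author's own statement) =====
-- stated objective: alternative
-- what changed: Replaces A's needle-first nested loop with early return by a single scan over channels that scores each channel with the index of the first needle it matches (trying only needles that would beat the current best) and keeps the argmin (score, earliest channel), breaking on a perfect score of 0.
import Mathlib
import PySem

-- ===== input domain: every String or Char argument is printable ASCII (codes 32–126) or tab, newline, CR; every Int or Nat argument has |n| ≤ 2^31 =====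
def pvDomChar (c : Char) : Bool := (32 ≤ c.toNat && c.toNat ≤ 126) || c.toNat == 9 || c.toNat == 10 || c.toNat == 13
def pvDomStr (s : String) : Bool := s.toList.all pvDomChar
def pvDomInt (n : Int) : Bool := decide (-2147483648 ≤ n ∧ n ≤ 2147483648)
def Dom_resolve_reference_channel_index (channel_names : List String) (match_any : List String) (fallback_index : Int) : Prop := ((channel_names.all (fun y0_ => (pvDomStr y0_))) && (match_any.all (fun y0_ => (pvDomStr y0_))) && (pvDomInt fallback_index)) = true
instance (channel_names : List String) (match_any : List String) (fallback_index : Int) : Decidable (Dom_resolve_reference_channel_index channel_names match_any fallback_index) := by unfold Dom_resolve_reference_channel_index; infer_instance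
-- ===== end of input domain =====

-- B replaces A's needle-first nested loop (early return) by a single scan over the
-- channels keeping the argmin of (first-matching-needle index, channel index), trying
-- only needles that would beat the current best; objective: alternative decomposition.
-- Equality of return values is proved for all inputs.

-- ===== PORT A =====
-- inner loop: 'for i, name in enumerate(channel_names): if name and n in name.lower(): return i'
def pvAChan (n : String) : List String → Nat → Option Nat
  | [], _ => none
  | name :: rest, i =>
      if name ≠ "" ∧ PySem.Str.isIn n (PySem.Str.lower name) = true then some i
      else pvAChan n rest (i + 1)

-- outer loop: 'for needle in (match_any or []): n = needle.lower(); <inner>; …'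
def pvANeedles (channel_names : List String) : List String → Option Nat
  | [] => none
  | needle :: rest =>
      match pvAChan (PySem.Str.lower needle) channel_names 0 with
      | some i => some i
      | none => pvANeedles channel_names rest

def resolve_reference_channel_index (channel_names : List String) (match_any : List String) (fallback_index : Int) : Int :=
  if channel_names = [] then fallback_index
  else
    match pvANeedles channel_names match_any with
    | some i => (i : Int)
    | none => fallback_index

-- ===== PORT B =====
-- B's channel scan: state (best_score, best_i); 'needles[:limit]' is List.take, and
-- 'score = next((j for j, n in enumerate(needles[:limit]) if n in low), None)' is
-- the library first-index search List.findIdx?; a found score beats the best by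
-- construction; score 0 breaks the scan.
def pvBLoop (needles : List String) : List String → Nat → Option Nat → Option Nat → Option Nat
  | [], _, _, best_i => best_i
  | name :: rest, i, best_score, best_i =>
      if name = "" then pvBLoop needles rest (i + 1) best_score best_i
      else
        match (match best_score with
               | none => needles
               | some b => needles.take b).findIdx?
                (fun n => PySem.Str.isIn n (PySem.Str.lower name)) with
        | none => pvBLoop needles rest (i + 1) best_score best_i
        | some score =>
            if score = 0 then some i
            else pvBLoop needles rest (i + 1) (some score) (some i)

def resolve_reference_channel_index_alt (channel_names : List String) (match_any : List String) (fallback_index : Int) : Int :=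
  if channel_names = [] ∨ match_any = [] then fallback_index
  else
    match pvBLoop (match_any.map PySem.Str.lower) channel_names 0 none none with
    | some i => (i : Int)
    | none => fallback_index

-- ===== PRECONDITION & SPEC =====
def Spec_resolve_reference_channel_index (channel_names : List String) (match_any : List String) (fallback_index : Int) (out : Int) : Prop := out = resolve_reference_channel_index_alt channel_names match_any fallback_index
instance (channel_names : List String) (match_any : List String) (fallback_index : Int) (out : Int) : Decidable (Spec_resolve_reference_channel_index channel_names match_any fallback_index out) := by unfold Spec_resolve_reference_channel_index; infer_instance

-- ===== CLAIM (what is proved, stated in full; the proofs are below) =====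
def Claim_equal_resolve_reference_channel_index : Prop := ∀ (channel_names : List String) (match_any : List String) (fallback_index : Int), Dom_resolve_reference_channel_index channel_names match_any fallback_index → Spec_resolve_reference_channel_index channel_names match_any fallback_index (resolve_reference_channel_index channel_names match_any fallback_index)

-- ===== LEMMAS AND PROOFS =====

-- B's loop with no needles never updates its accumulator.
theorem pvBLoop_nil (names : List String) (i : Nat) (bs bi : Option Nat) :
    pvBLoop [] names i bs bi = bi := by
  induction names generalizing i with
  | nil => rfl
  | cons name rest ih =>
      simp only [pvBLoop]
      cases bs <;> simp only [List.take_nil, List.findIdx?_nil] <;> split <;> exact ih _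

-- Once the kept score is 1 and no remaining channel matches the head needle (score 0),
-- the accumulator can never be beaten: only needles[:1] = [head] is ever tried.
theorem pvBLoop_one_nomatch (n : String) (ns : List String) (names : List String)
    (h : ∀ name ∈ names, ¬(name ≠ "" ∧ PySem.Str.isIn n (PySem.Str.lower name) = true)) :
    ∀ (i : Nat) (bi : Option Nat), pvBLoop (n :: ns) names i (some 1) bi = bi := by
  induction names with
  | nil => intro i bi; rfl
  | cons name rest ih =>
      intro i bi
      have hrest : ∀ name ∈ rest, ¬(name ≠ "" ∧ PySem.Str.isIn n (PySem.Str.lower name) = true) := by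
        intro x hx; exact h x (List.mem_cons_of_mem _ hx)
      by_cases he : name = ""
      · simp only [pvBLoop, if_pos he]; exact ih hrest (i + 1) bi
      · have hno : PySem.Str.isIn n (PySem.Str.lower name) = false := by
          cases hx : PySem.Str.isIn n (PySem.Str.lower name) with
          | false => rfl
          | true => exact absurd ⟨he, hx⟩ (h name List.mem_cons_self)
        simp only [pvBLoop, if_neg he, List.take_succ_cons, List.take_zero,
          List.findIdx?_cons, List.findIdx?_nil, hno, Bool.false_eq_true, if_false,
          Option.map_none]
        exact ih hrest (i + 1) bi

-- If no (nonempty-named) channel matches the head needle, dropping it shifts all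
-- kept scores by one and leaves the kept channel index unchanged.
theorem pvBLoop_cons_nomatch (n : String) (ns : List String) (names : List String)
    (h : ∀ name ∈ names, ¬(name ≠ "" ∧ PySem.Str.isIn n (PySem.Str.lower name) = true)) :
    ∀ (i : Nat) (bs bi : Option Nat),
      pvBLoop (n :: ns) names i (bs.map (· + 1)) bi = pvBLoop ns names i bs bi := by
  induction names with
  | nil => intro i bs bi; rfl
  | cons name rest ih =>
      intro i bs bi
      have hrest : ∀ name ∈ rest, ¬(name ≠ "" ∧ PySem.Str.isIn n (PySem.Str.lower name) = true) := by
        intro x hx; exact h x (List.mem_cons_of_mem _ hx)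
      by_cases he : name = ""
      · simp only [pvBLoop, if_pos he]; exact ih hrest (i + 1) bs bi
      · have hno : PySem.Str.isIn n (PySem.Str.lower name) = false := by
          cases hx : PySem.Str.isIn n (PySem.Str.lower name) with
          | false => rfl
          | true => exact absurd ⟨he, hx⟩ (h name List.mem_cons_self)
        -- the searched pool on the left is n :: (pool on the right)
        have hpool : (match bs.map (· + 1) with
                      | none => n :: ns
                      | some b => (n :: ns).take b) =
                     n :: (match bs with | none => ns | some b => ns.take b) := by
          cases bs with
          | none => rfl
          | some b => simp [List.take_succ_cons]
        simp only [pvBLoop, if_neg he, hpool, List.findIdx?_cons, hno,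
          Bool.false_eq_true, if_false]
        cases hfind : (match bs with | none => ns | some b => ns.take b).findIdx?
            (fun m => PySem.Str.isIn m (PySem.Str.lower name)) with
        | none => simp only [Option.map_none]; exact ih hrest (i + 1) bs bi
        | some s =>
            simp only [Option.map_some, if_neg (by omega : ¬(s + 1 = 0))]
            by_cases hs0 : s = 0
            · subst hs0; rw [if_pos rfl]
              exact pvBLoop_one_nomatch n ns rest hrest (i + 1) (some i)
            · rw [if_neg hs0]
              have hms : (some s : Option Nat).map (· + 1) = some (s + 1) := rfl
              rw [← hms, ih hrest]

-- pvAChan = none means no (nonempty) channel matches the needle.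
theorem pvAChan_none (n : String) (names : List String) :
    ∀ (i : Nat), pvAChan n names i = none →
      ∀ name ∈ names, ¬(name ≠ "" ∧ PySem.Str.isIn n (PySem.Str.lower name) = true) := by
  induction names with
  | nil => intro i _ name hmem; cases hmem
  | cons name rest ih =>
      intro i hnone x hx
      by_cases hm : name ≠ "" ∧ PySem.Str.isIn n (PySem.Str.lower name) = true
      · simp only [pvAChan, if_pos hm] at hnone; cases hnone
      · simp only [pvAChan, if_neg hm] at hnone
        rcases List.mem_cons.mp hx with h1 | h2
        · subst h1; exact hm
        · exact ih (i + 1) hnone x h2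

-- If the first match of n in names (counting from i) is at j, B's scan with a
-- none-or-positive kept score returns exactly j (score 0 wins immediately).
theorem pvBLoop_cons_match (n : String) (ns : List String) (names : List String) :
    ∀ (i j : Nat) (bs bi : Option Nat), pvAChan n names i = some j →
      (∀ b, bs = some b → 0 < b) →
      pvBLoop (n :: ns) names i bs bi = some j := by
  induction names with
  | nil => intro i j bs bi hfound _; cases hfound
  | cons name rest ih =>
      intro i j bs bi hfound hbs
      by_cases hm : name ≠ "" ∧ PySem.Str.isIn n (PySem.Str.lower name) = true
      · simp only [pvAChan, if_pos hm] at hfound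
        have he : ¬ name = "" := hm.1
        -- the searched pool starts with n, which matches: score 0, break
        cases bs with
        | none =>
            simp only [pvBLoop, if_neg he, List.findIdx?_cons, hm.2, if_true]
            exact hfound
        | some b =>
            obtain ⟨b', rfl⟩ := Nat.exists_eq_succ_of_ne_zero
              (Nat.pos_iff_ne_zero.mp (hbs b rfl))
            simp only [pvBLoop, if_neg he, List.take_succ_cons, List.findIdx?_cons,
              hm.2, if_true]
            exact hfound
      · simp only [pvAChan, if_neg hm] at hfound
        by_cases he : name = ""
        · simp only [pvBLoop, if_pos he]
          exact ih (i + 1) j bs bi hfound hbs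
        · have hno : PySem.Str.isIn n (PySem.Str.lower name) = false := by
            cases hx : PySem.Str.isIn n (PySem.Str.lower name) with
            | false => rfl
            | true => exact absurd ⟨he, hx⟩ hm
          cases bs with
          | none =>
              simp only [pvBLoop, if_neg he, List.findIdx?_cons, hno,
                Bool.false_eq_true, if_false]
              cases hfind : ns.findIdx? (fun m => PySem.Str.isIn m (PySem.Str.lower name)) with
              | none => exact ih (i + 1) j none bi hfound hbs
              | some s =>
                  simp only [Option.map_some, if_neg (by omega : ¬(s + 1 = 0))]
                  exact ih (i + 1) j (some (s + 1)) (some i) hfound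
                    (by intro b hb; cases hb; omega)
          | some b =>
              obtain ⟨b', rfl⟩ := Nat.exists_eq_succ_of_ne_zero
                (Nat.pos_iff_ne_zero.mp (hbs b rfl))
              simp only [pvBLoop, if_neg he, List.take_succ_cons, List.findIdx?_cons,
                hno, Bool.false_eq_true, if_false]
              cases hfind : (ns.take b').findIdx? (fun m => PySem.Str.isIn m (PySem.Str.lower name)) with
              | none => exact ih (i + 1) j (some (b' + 1)) bi hfound hbs
              | some s =>
                  simp only [Option.map_some, if_neg (by omega : ¬(s + 1 = 0))]
                  exact ih (i + 1) j (some (s + 1)) (some i) hfound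
                    (by intro b hb; cases hb; omega)

-- The two decompositions agree on the raw optional result.
theorem pv_main (names : List String) :
    ∀ (ms : List String), pvANeedles names ms = pvBLoop (ms.map PySem.Str.lower) names 0 none none := by
  intro ms
  induction ms with
  | nil => simp only [List.map_nil, pvANeedles, pvBLoop_nil]
  | cons m rest ih =>
      simp only [List.map_cons]
      cases hch : pvAChan (PySem.Str.lower m) names 0 with
      | some j =>
          simp only [pvANeedles, hch]
          exact (pvBLoop_cons_match (PySem.Str.lower m) (rest.map PySem.Str.lower) names 0 j none none hch
            (by intro b hb; cases hb)).symm
      | none =>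
          simp only [pvANeedles, hch]
          rw [ih]
          have h := pvAChan_none (PySem.Str.lower m) names 0 hch
          have := pvBLoop_cons_nomatch (PySem.Str.lower m) (rest.map PySem.Str.lower) names h 0 none none
          simpa using this.symm

-- ===== VERDICT =====
theorem resolve_reference_channel_index_spec : Claim_equal_resolve_reference_channel_index := by
  intro channel_names match_any fallback_index _
  unfold Spec_resolve_reference_channel_index resolve_reference_channel_index resolve_reference_channel_index_alt
  by_cases hc : channel_names = []
  · simp [hc]
  · by_cases hma : match_any = []
    · subst hma
      simp [pvANeedles]
    · rw [if_neg hc, if_neg (by tauto), pv_main]
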